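-- pv_equiv track=rewrite | github.com/carlosvilela/exemplosPython | av2_questao03_letra_b.py | gerarListaAte
-- ===== SOURCE A (Python) =====
-- def gerarListaAte (entradaLista, valorParada):
--     tamanhoLista = len(entradaLista)
--     novaLista = []
--     for i in range(tamanhoLista):
--         novaLista.append(entradaLista[i])
--         if (entradaLista[i] == valorParada):
--             del(novaLista[i])
--             break
--     return novaLista
-- ===== SOURCE B (Python) =====
-- def gerarListaAte(entradaLista, valorParada):
--     try:
--         idx = entradaLista.index(valorParada)
--     except ValueError:
--         idx = len(entradaLista)
--     return entradaLista[:idx]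
-- ===== Notes on version B (the rewrite author's own statement) =====
-- stated objective: simpler
-- what changed: Replaces A's append-then-delete index loop with a two-phase find-the-stop-index (list.index / ValueError) followed by a single slice copy.
import Mathlib
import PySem

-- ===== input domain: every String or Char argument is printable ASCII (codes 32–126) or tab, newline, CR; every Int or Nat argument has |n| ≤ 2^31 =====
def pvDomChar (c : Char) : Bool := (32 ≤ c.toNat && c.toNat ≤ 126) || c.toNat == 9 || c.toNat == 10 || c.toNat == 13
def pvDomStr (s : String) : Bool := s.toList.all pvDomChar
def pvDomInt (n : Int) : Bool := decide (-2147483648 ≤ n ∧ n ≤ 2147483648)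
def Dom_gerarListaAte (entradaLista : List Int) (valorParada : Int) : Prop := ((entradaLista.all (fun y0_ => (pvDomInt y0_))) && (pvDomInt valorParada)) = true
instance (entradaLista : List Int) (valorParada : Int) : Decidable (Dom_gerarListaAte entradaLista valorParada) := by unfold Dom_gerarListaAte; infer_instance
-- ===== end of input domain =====

-- B replaces A's append-then-delete index loop with find-the-stop-index then one slice copy (simpler).

-- ===== PORT A =====
-- literal transliteration of A's indexed loop: append entradaLista[i]; if it equals
-- valorParada, del novaLista[i] and break
def gerarListaAteGo (entradaLista : List Int) (valorParada : Int) :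
    List Int → List Int → List Int
  | [], nova => nova
  | i :: rest, nova =>
      match PySem.List.pyGet? entradaLista i with
      | none => nova  -- unreachable: i ranges over range(len(entradaLista))
      | some x =>
          let nova' := nova ++ [x]
          if x = valorParada then
            match PySem.List.pop? nova' i with   -- del novaLista[i]
            | none => nova'
            | some r => r.2                      -- then break
          else gerarListaAteGo entradaLista valorParada rest nova'

def gerarListaAte (entradaLista : List Int) (valorParada : Int) : List Int :=
  gerarListaAteGo entradaLista valorParada
    (PySem.List.pyRange 0 (entradaLista.length : Int) 1) []

-- ===== PORT B =====
def gerarListaAte_alt (entradaLista : List Int) (valorParada : Int) : List Int :=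
  let idx : Nat :=
    match PySem.List.index? entradaLista valorParada with
    | some k => k
    | none => entradaLista.length
  PySem.List.slice entradaLista none (some (idx : Int))

-- ===== PRECONDITION & SPEC =====
def Spec_gerarListaAte (entradaLista : List Int) (valorParada : Int) (out : List Int) : Prop := out = gerarListaAte_alt entradaLista valorParada
instance (entradaLista : List Int) (valorParada : Int) (out : List Int) : Decidable (Spec_gerarListaAte entradaLista valorParada out) := by unfold Spec_gerarListaAte; infer_instance

-- ===== CLAIM (what is proved, stated in full; the proofs are below) =====
def Claim_equal_gerarListaAte : Prop := ∀ (entradaLista : List Int) (valorParada : Int), Dom_gerarListaAte entradaLista valorParada → Spec_gerarListaAte entradaLista valorParada (gerarListaAte entradaLista valorParada)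

-- ===== LEMMAS AND PROOFS =====

-- both sides equal takeWhile (· ≠ v)
theorem alt_eq_takeWhile (l : List Int) (v : Int) :
    gerarListaAte_alt l v = l.takeWhile (fun x => x ≠ v) := by
  unfold gerarListaAte_alt
  rcases h : PySem.List.index? l v with _ | k
  · have hv : v ∉ l := (PySem.List.index?_eq_none_iff l v).mp h
    simp only [PySem.List.slice_to_natCast]
    rw [List.takeWhile_eq_self_iff.mpr, List.take_length]
    intro x hx; simp only [decide_eq_true_eq]
    exact fun hxe => hv (hxe ▸ hx)
  · obtain ⟨pre, suf, rfl, rfl, hvpre⟩ := (PySem.List.index?_eq_some_iff _ _ _).mp h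
    simp only [PySem.List.slice_to_natCast]
    rw [List.take_left, List.takeWhile_append]
    rw [List.takeWhile_eq_self_iff.mpr (by
      intro x hx; simp only [decide_eq_true_eq]; exact fun hxe => hvpre (hxe ▸ hx))]
    simp

theorem go_spec (v : Int) : ∀ (suf pre : List Int), v ∉ pre →
    gerarListaAteGo (pre ++ suf) v
      (PySem.List.pyRange (pre.length : Int) ((pre ++ suf).length : Int) 1) pre
      = pre ++ suf.takeWhile (fun x => x ≠ v) := by
  intro suf
  induction suf with
  | nil => intro pre _; simp [PySem.List.pyRange_one_eq_nil, gerarListaAteGo]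
  | cons x rest ih =>
    intro pre hpre
    rw [PySem.List.pyRange_one_cons (by
      simp only [List.length_append, List.length_cons]; push_cast; omega)]
    simp only [gerarListaAteGo]
    rw [PySem.List.pyGet?_append_length]
    dsimp only
    by_cases hx : x = v
    · simp only [hx, if_true]
      have hp : PySem.List.pop? (pre ++ [v]) (pre.length : Int)
          = some ((pre ++ [v])[pre.length]'(by simp), (pre ++ [v]).eraseIdx pre.length) := by
        exact PySem.List.pop?_natCast _ _ (by simp)
      rw [hp]
      simp [List.eraseIdx_append_of_length_le (le_refl _)]
    · rw [if_neg hx]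
      have : (pre.length : Int) + 1 = ((pre ++ [x]).length : Nat) := by simp
      have h2 : pre ++ x :: rest = (pre ++ [x]) ++ rest := by simp
      rw [this, h2]
      have hnp : v ∉ pre ++ [x] := by
        intro hmem
        rcases List.mem_append.mp hmem with hm | hm
        · exact hpre hm
        · exact hx (List.eq_of_mem_singleton hm).symm
      rw [ih (pre ++ [x]) hnp]
      simp [hx]

-- ===== VERDICT (by name: the statement is the Claim_ definition above) =====
theorem gerarListaAte_spec : Claim_equal_gerarListaAte := by
  intro l v _
  unfold Spec_gerarListaAte gerarListaAte
  rw [alt_eq_takeWhile]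
  have := go_spec v l [] (by simp)
  simpa using this
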